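-- pv_equiv track=rewrite | github.com/capensis/canopsis | sources/python/webcore/canopsis/webcore/services/weather.py | watcher_status
-- ===== SOURCE A (Python) =====
-- def watcher_status(watcher, pbehavior_eids_merged):
--     """
--         watcher_status
--
--         :param dict watcher: watcher entity document
--         :param set pbehavior_eids_merged: set with eids
--         :return dict pbhevahior: dict with pbehavior infos has active
--     """
--     ret_dict = {
--         'has_active_pbh': False,
--         'has_all_active_pbh': False
--     }
--     bool_set = set([])
--     for entity_id in watcher['depends']:
--         bool_set.add(entity_id in pbehavior_eids_merged)
--
--     if True in bool_set and False in bool_set: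
--         ret_dict['has_active_pbh'] = True
--         return ret_dict
--     elif True in bool_set:
--         ret_dict['has_all_active_pbh'] = True
--         return ret_dict
--     return ret_dict
-- ===== SOURCE B (Python) =====
-- def watcher_status(watcher, pbehavior_eids_merged):
--     deps = set(watcher['depends'])
--     present = deps & set(pbehavior_eids_merged)
--     return {
--         'has_active_pbh': bool(present) and present != deps,
--         'has_all_active_pbh': bool(present) and present == deps,
--     }
-- ===== Notes on version B (the rewrite author's own statement) =====
-- stated objective: idiomatic
-- what changed: Replaces the element-wise loop that accumulates a set of membership booleans (then tests True/False membership) with a set intersection: present = deps & eids, flags derived from present's emptiness and equality with deps.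
import Mathlib
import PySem

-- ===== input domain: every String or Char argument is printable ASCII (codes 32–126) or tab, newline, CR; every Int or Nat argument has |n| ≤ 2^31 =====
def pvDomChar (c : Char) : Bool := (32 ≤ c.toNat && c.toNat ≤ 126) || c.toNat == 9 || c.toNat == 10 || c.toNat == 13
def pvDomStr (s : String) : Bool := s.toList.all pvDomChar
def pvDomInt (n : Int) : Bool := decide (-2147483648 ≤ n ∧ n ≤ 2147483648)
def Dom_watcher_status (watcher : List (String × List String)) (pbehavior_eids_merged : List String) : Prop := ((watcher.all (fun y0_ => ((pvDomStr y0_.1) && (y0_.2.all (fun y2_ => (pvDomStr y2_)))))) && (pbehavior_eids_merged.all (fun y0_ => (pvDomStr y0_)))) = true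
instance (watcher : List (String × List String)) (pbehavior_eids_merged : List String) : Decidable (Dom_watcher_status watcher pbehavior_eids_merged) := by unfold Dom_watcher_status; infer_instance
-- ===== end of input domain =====

-- B replaces A's loop building a set of membership booleans by a set intersection
-- (present = deps & eids; flags from present's emptiness and equality with deps); plain idiomatic rewrite, same cost.

-- ===== PORT A =====
-- watcher['depends'] : first-match lookup; KeyError (excluded by Pre_) defaulted to []
def watcher_status (watcher : List (String × List String)) (pbehavior_eids_merged : List String) : List (String × Bool) :=
  let deps := ((PySem.Dict.mk watcher).get? "depends").getD []
  let bool_set : PySem.Set Bool :=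
    deps.foldl (fun s e => PySem.Set.add s (pbehavior_eids_merged.contains e)) PySem.Set.empty
  if bool_set.contains true && bool_set.contains false then
    [("has_active_pbh", true), ("has_all_active_pbh", false)]
  else if bool_set.contains true then
    [("has_active_pbh", false), ("has_all_active_pbh", true)]
  else
    [("has_active_pbh", false), ("has_all_active_pbh", false)]

-- ===== PORT B =====
def watcher_status_alt (watcher : List (String × List String)) (pbehavior_eids_merged : List String) : List (String × Bool) :=
  let deps := PySem.Set.ofList (((PySem.Dict.mk watcher).get? "depends").getD [])
  let present := PySem.Set.inter deps (PySem.Set.ofList pbehavior_eids_merged)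
  [("has_active_pbh", !present.isEmpty && !(PySem.Set.equal present deps)),
   ("has_all_active_pbh", !present.isEmpty && PySem.Set.equal present deps)]

-- ===== PRECONDITION & SPEC =====
-- Pre_ excludes only the inputs on which A raises KeyError ('depends' key missing); B raises there too.
def Pre_watcher_status (watcher : List (String × List String)) (pbehavior_eids_merged : List String) : Prop :=
  "depends" ∈ watcher.map (·.1)
instance (watcher : List (String × List String)) (pbehavior_eids_merged : List String) : Decidable (Pre_watcher_status watcher pbehavior_eids_merged) := by unfold Pre_watcher_status; infer_instance
def pvWitness_watcher_status : (List (String × List String)) × List String :=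
  ([("depends", ["a", "b"])], ["a"])

def Spec_watcher_status (watcher : List (String × List String)) (pbehavior_eids_merged : List String) (out : List (String × Bool)) : Prop := out = watcher_status_alt watcher pbehavior_eids_merged
instance (watcher : List (String × List String)) (pbehavior_eids_merged : List String) (out : List (String × Bool)) : Decidable (Spec_watcher_status watcher pbehavior_eids_merged out) := by unfold Spec_watcher_status; infer_instance

-- ===== CLAIM (what is proved, stated in full; the proofs are below) =====
def Claim_equal_watcher_status : Prop := ∀ (watcher : List (String × List String)) (pbehavior_eids_merged : List String), Dom_watcher_status watcher pbehavior_eids_merged → Pre_watcher_status watcher pbehavior_eids_merged → Spec_watcher_status watcher pbehavior_eids_merged (watcher_status watcher pbehavior_eids_merged)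

-- ===== LEMMAS AND PROOFS =====

-- membership of a boolean b in A's bool_set ↔ some dep has that membership value
theorem mem_bool_set (deps pbh : List String) (b : Bool) :
    b ∈ deps.foldl (fun s e => PySem.Set.add s (pbh.contains e)) PySem.Set.empty ↔
      ∃ e ∈ deps, pbh.contains e = b := by
  rw [PySem.Set.mem_foldl_add]
  simp [PySem.Set.empty, eq_comm]

theorem present_mem (deps pbh : List String) (x : String) :
    x ∈ PySem.Set.inter (PySem.Set.ofList deps) (PySem.Set.ofList pbh) ↔ x ∈ deps ∧ x ∈ pbh := by
  rw [PySem.Set.mem_inter]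
  simp [PySem.Set.mem_ofList]

theorem core_eq (deps pbh : List String) :
    (if (deps.foldl (fun s e => PySem.Set.add s (pbh.contains e)) PySem.Set.empty).contains true &&
        (deps.foldl (fun s e => PySem.Set.add s (pbh.contains e)) PySem.Set.empty).contains false then
       [(("has_active_pbh" : String), true), (("has_all_active_pbh" : String), false)]
     else if (deps.foldl (fun s e => PySem.Set.add s (pbh.contains e)) PySem.Set.empty).contains true then
       [(("has_active_pbh" : String), false), (("has_all_active_pbh" : String), true)]
     else
       [(("has_active_pbh" : String), false), (("has_all_active_pbh" : String), false)]) =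
    [(("has_active_pbh" : String),
        !(PySem.Set.inter (PySem.Set.ofList deps) (PySem.Set.ofList pbh)).isEmpty &&
        !(PySem.Set.equal (PySem.Set.inter (PySem.Set.ofList deps) (PySem.Set.ofList pbh)) (PySem.Set.ofList deps))),
     (("has_all_active_pbh" : String),
        !(PySem.Set.inter (PySem.Set.ofList deps) (PySem.Set.ofList pbh)).isEmpty &&
        PySem.Set.equal (PySem.Set.inter (PySem.Set.ofList deps) (PySem.Set.ofList pbh)) (PySem.Set.ofList deps))] := by
  have hT : (deps.foldl (fun s e => PySem.Set.add s (pbh.contains e)) PySem.Set.empty).contains true = true ↔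
      ∃ e ∈ deps, e ∈ pbh := by
    rw [PySem.Set.contains_iff, mem_bool_set]
    simp
  have hF : (deps.foldl (fun s e => PySem.Set.add s (pbh.contains e)) PySem.Set.empty).contains false = true ↔
      ∃ e ∈ deps, e ∉ pbh := by
    rw [PySem.Set.contains_iff, mem_bool_set]
    simp
  have hE : (PySem.Set.inter (PySem.Set.ofList deps) (PySem.Set.ofList pbh)).isEmpty = true ↔
      ¬ ∃ e ∈ deps, e ∈ pbh := by
    rw [List.isEmpty_iff, List.eq_nil_iff_forall_not_mem]
    constructor
    · rintro h ⟨e, he, hp⟩; exact h e ((present_mem deps pbh e).mpr ⟨he, hp⟩)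
    · intro h e hmem
      rcases (present_mem deps pbh e).mp hmem with ⟨he, hp⟩
      exact h ⟨e, he, hp⟩
  have hQ : PySem.Set.equal (PySem.Set.inter (PySem.Set.ofList deps) (PySem.Set.ofList pbh)) (PySem.Set.ofList deps) = true ↔
      ∀ e ∈ deps, e ∈ pbh := by
    rw [PySem.Set.equal_iff]
    constructor
    · intro h e he
      have := (h e).mpr (by simpa [PySem.Set.mem_ofList] using he)
      exact ((present_mem deps pbh e).mp this).2
    · intro h x
      rw [present_mem, PySem.Set.mem_ofList]
      exact ⟨fun ⟨hd, _⟩ => hd, fun hd => ⟨hd, h x hd⟩⟩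
  split_ifs with hc hc2
  · -- some in, some out
    rw [Bool.and_eq_true] at hc
    have hsome := hT.mp hc.1
    have hnall : ¬ ∀ e ∈ deps, e ∈ pbh := by
      rcases hF.mp hc.2 with ⟨e, he, hp⟩
      intro h; exact hp (h e he)
    have h3 : (PySem.Set.inter (PySem.Set.ofList deps) (PySem.Set.ofList pbh)).isEmpty = false := by
      rw [← Bool.not_eq_true, hE]; intro h; exact h hsome
    have h4 : PySem.Set.equal (PySem.Set.inter (PySem.Set.ofList deps) (PySem.Set.ofList pbh)) (PySem.Set.ofList deps) = false := by
      rw [← Bool.not_eq_true, hQ]; exact hnall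
    rw [h3, h4]; rfl
  · -- all in (and deps nonempty)
    have hsome := hT.mp hc2
    have hall : ∀ e ∈ deps, e ∈ pbh := by
      intro e he
      by_contra hp
      exact hc (by rw [Bool.and_eq_true]; exact ⟨hc2, hF.mpr ⟨e, he, hp⟩⟩)
    have h3 : (PySem.Set.inter (PySem.Set.ofList deps) (PySem.Set.ofList pbh)).isEmpty = false := by
      rw [← Bool.not_eq_true, hE]; intro h; exact h hsome
    have h4 := hQ.mpr hall
    rw [h3, h4]; rfl
  · -- none in
    have hnone : ¬ ∃ e ∈ deps, e ∈ pbh := by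
      intro h; exact hc2 (hT.mpr h)
    have h3 := hE.mpr hnone
    rw [h3]; rfl

-- ===== VERDICT (by name: the statement is the Claim_ definition above) =====
theorem watcher_status_spec : Claim_equal_watcher_status := by
  intro watcher pbh _ _
  unfold Spec_watcher_status watcher_status watcher_status_alt
  exact core_eq _ pbh
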